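-- pv_equiv track=rewrite | github.com/holdenweb/as_blog | src/tools/snippets.py | snippet_ranges
-- ===== SOURCE A (Python) =====
-- from typing import List
-- from typing import Optional
-- from typing import Tuple
--
-- SN_PREFIX = "# snippet "
--
-- SN_CLOSE = "# end snippet"
--
-- def process_line(
--     l_no: int, line: str, sn_start: Optional[int], ranges: List[Tuple[int, int]]
-- ) -> Optional[int]:
--     start = line.startswith(SN_PREFIX)
--     end = line.startswith(SN_CLOSE)
--     if start:  # A new snippet starts here
--         if sn_start is not None:  # If we are currently in a snippet
--             ranges.append((sn_start, l_no))  # ... then add it to the ranges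
--         sn_start = l_no  # Mark start of snippet
--     elif end:
--         if sn_start is None:  # Snippets must start before they can end
--             raise ValueError(f"Snippet ends without start on line {l_no+1}")
--         ranges.append((sn_start, l_no + 1))
--         sn_start = None
--     return sn_start
--
-- def snippet_ranges(lines: List[str]):
--     ranges: List[str] = []
--     snippet = None
--     for l_no, line in enumerate(lines):
--         snippet = process_line(l_no, line, snippet, ranges)
--     if snippet:
--         ranges.append((snippet, -1))
--     return ranges
-- ===== SOURCE B (Python) =====
-- from typing import List
--
-- SN_PREFIX = "# snippet "
--
-- SN_CLOSE = "# end snippet"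
--
--
-- def snippet_ranges(lines: List[str]):
--     # Pass 1: collect the marker events only.
--     markers = [
--         (i, line.startswith(SN_PREFIX))
--         for i, line in enumerate(lines)
--         if line.startswith(SN_PREFIX) or line.startswith(SN_CLOSE)
--     ]
--     # Pass 2: validate -- every end marker must be immediately preceded,
--     # among the markers, by a start marker.
--     for prev, (i, is_start) in zip([None] + markers, markers):
--         if not is_start and (prev is None or not prev[1]):
--             raise ValueError(f"Snippet ends without start on line {i+1}")
--     # Pass 3: each start marker's range ends at its successor marker
--     # (at j for a start, at j+1 for an end), or at -1 if it is the last marker.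
--     return [
--         (i, -1) if nxt is None else (i, nxt[0] if nxt[1] else nxt[0] + 1)
--         for (i, is_start), nxt in zip(markers, markers[1:] + [None])
--         if is_start
--     ]
-- ===== Notes on version B (the rewrite author's own statement) =====
-- stated objective: alternative
-- what changed: B replaces A's per-line helper that threads an open-start state through every line by a stateless three-pass formulation: collect marker events, validate each end marker against its predecessor marker via zip, then compute every start marker's range end from its successor marker alone (zip with the shifted marker list).
-- intended difference: On inputs whose only marker line is a '# snippet ' start on line 0, A's 'if snippet:' truthiness test drops the unclosed snippet and returns an empty result, while B returns the single open-ended range (0, -1), which is intended since 0 is a valid line number, not falsity. — e.g. on snippet_ranges(["# snippet one"]): A returns [], B returns [(0, -1)]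
import Mathlib
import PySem

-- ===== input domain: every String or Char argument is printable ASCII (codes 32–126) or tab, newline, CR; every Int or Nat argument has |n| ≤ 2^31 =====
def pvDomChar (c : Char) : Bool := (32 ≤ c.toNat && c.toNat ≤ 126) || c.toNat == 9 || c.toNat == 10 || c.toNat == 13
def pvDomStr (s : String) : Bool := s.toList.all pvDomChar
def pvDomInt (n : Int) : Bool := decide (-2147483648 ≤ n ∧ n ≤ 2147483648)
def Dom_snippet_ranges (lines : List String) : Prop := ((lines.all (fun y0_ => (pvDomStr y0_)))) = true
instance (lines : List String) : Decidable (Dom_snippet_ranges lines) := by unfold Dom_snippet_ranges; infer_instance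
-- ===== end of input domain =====

-- B replaces A's per-line open/close state machine by a stateless formulation: collect the marker
-- events, validate them by a predecessor-pair check, and compute each start's range end from its
-- successor marker alone (zip with the shifted marker list); B also fixes A's `if snippet:`
-- truthiness slip for an unclosed snippet starting at line 0 (stated as D_ below).

def SN_PREFIX : String := "# snippet "

def SN_CLOSE : String := "# end snippet"

-- ===== PORT A =====
-- `raise ValueError` is modelled by `none`, propagated through the loop; Pre_ excludes those inputs.
def process_line (l_no : Int) (line : String) (sn_start : Option Int)
    (ranges : List (Int × Int)) : Option (Option Int × List (Int × Int)) :=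
  let start := PySem.Str.startswith line SN_PREFIX
  let isEnd := PySem.Str.startswith line SN_CLOSE
  if start then
    match sn_start with
    | some s => some (some l_no, ranges ++ [(s, l_no)])
    | none => some (some l_no, ranges)
  else if isEnd then
    match sn_start with
    | none => none               -- raise ValueError(...)
    | some s => some (none, ranges ++ [(s, l_no + 1)])
  else
    some (sn_start, ranges)

def snippet_loop : List (Int × String) → Option Int → List (Int × Int) →
    Option (Option Int × List (Int × Int))
  | [], snippet, ranges => some (snippet, ranges)
  | (i, line) :: rest, snippet, ranges =>
    match process_line i line snippet ranges with
    | none => none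
    | some (s, r) => snippet_loop rest s r

def snippet_ranges (lines : List String) : List (Int × Int) :=
  match snippet_loop (PySem.List.enumerate lines) none [] with
  | none => []                   -- exception path; excluded by Pre_
  | some (snippet, ranges) =>
    match snippet with
    | some s => if s ≠ 0 then ranges ++ [(s, -1)] else ranges   -- `if snippet:` truthiness
    | none => ranges

-- ===== PORT B =====
-- Pass 1 of Source B: the marker events (line number, is_start).
def alt_markers (lines : List String) : List (Int × Bool) :=
  ((PySem.List.enumerate lines).filter
      (fun p => PySem.Str.startswith p.2 SN_PREFIX || PySem.Str.startswith p.2 SN_CLOSE)).map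
    (fun p => (p.1, PySem.Str.startswith p.2 SN_PREFIX))

-- Passes 2 and 3 of Source B: the predecessor-pair validity check (`raise` modelled as `[]`,
-- excluded by Pre_) and the per-start successor pairing via zip with the shifted list.
def snippet_ranges_alt (lines : List String) : List (Int × Int) :=
  let markers := alt_markers lines;
  if ((none :: markers.map some).zip markers).any
      (fun pc => !pc.2.2 && (match pc.1 with | none => true | some q => !q.2))
  then []                        -- raise ValueError(...)
  else
    ((markers.zip (markers.tail.map some ++ [none])).filter (fun p => p.1.2)).map
      (fun p => match p.2 with
        | none => (p.1.1, (-1 : Int))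
        | some q => (p.1.1, if q.2 then q.1 else q.1 + 1))

-- ===== PRECONDITION & SPEC =====
-- The start/end flags of the marker lines, in order (index-free; used only to state Pre_).
def markerFlags (lines : List String) : List Bool :=
  (lines.filter
      (fun l => PySem.Str.startswith l SN_PREFIX || PySem.Str.startswith l SN_CLOSE)).map
    (fun l => PySem.Str.startswith l SN_PREFIX)

-- Pre_ excludes exactly the inputs where A raises ValueError: an end-marker line that appears
-- before any start marker, or whose most recent preceding marker line is also an end marker
-- (stated on consecutive pairs of marker flags).
def Pre_snippet_ranges (lines : List String) : Prop :=
  (markerFlags lines).head? ≠ some false ∧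
    ∀ p ∈ (markerFlags lines).zip (markerFlags lines).tail, p.2 = false → p.1 = true
instance (lines : List String) : Decidable (Pre_snippet_ranges lines) := by
  unfold Pre_snippet_ranges; infer_instance

def pvWitness_snippet_ranges : List String :=
  ["# snippet one", "print(1)", "# end snippet", "x = 2"]

-- On inputs whose only marker line is a '# snippet ' start on line 0, A's `if snippet:` truthiness
-- test drops the unclosed snippet and returns an empty result, while B returns the single
-- open-ended range (0, -1), which is intended: 0 is a valid line number, not falsity.
def D_snippet_ranges (lines : List String) : Prop :=
  lines ≠ [] ∧ PySem.Str.startswith (lines.headD "") SN_PREFIX = true ∧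
    ∀ x ∈ lines.tail, PySem.Str.startswith x SN_PREFIX = false ∧
      PySem.Str.startswith x SN_CLOSE = false
instance (lines : List String) : Decidable (D_snippet_ranges lines) := by
  unfold D_snippet_ranges; infer_instance

def Spec_snippet_ranges (lines : List String) (out : List (Int × Int)) : Prop :=
  ¬ D_snippet_ranges lines → out = snippet_ranges_alt lines
instance (lines : List String) (out : List (Int × Int)) : Decidable (Spec_snippet_ranges lines out) := by
  unfold Spec_snippet_ranges; infer_instance

def pvDiffWitness_snippet_ranges : List String := ["# snippet one"]

def pvDiffWitnessOut_snippet_ranges : (List (Int × Int)) × (List (Int × Int)) :=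
  ([], [(0, -1)])

-- ===== CLAIM (what is proved, stated in full; the proofs are below) =====
def Claim_unchanged_snippet_ranges : Prop := ∀ (lines : List String), Dom_snippet_ranges lines → Pre_snippet_ranges lines → Spec_snippet_ranges lines (snippet_ranges lines)
def Claim_changed_snippet_ranges : Prop := Dom_snippet_ranges (pvDiffWitness_snippet_ranges) ∧ Pre_snippet_ranges (pvDiffWitness_snippet_ranges) ∧ D_snippet_ranges (pvDiffWitness_snippet_ranges) ∧ snippet_ranges (pvDiffWitness_snippet_ranges) = pvDiffWitnessOut_snippet_ranges.1 ∧ snippet_ranges_alt (pvDiffWitness_snippet_ranges) = pvDiffWitnessOut_snippet_ranges.2 ∧ pvDiffWitnessOut_snippet_ranges.1 ≠ pvDiffWitnessOut_snippet_ranges.2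
def Claim_exact_snippet_ranges : Prop := ∀ (lines : List String), Dom_snippet_ranges lines → Pre_snippet_ranges lines → D_snippet_ranges lines → snippet_ranges lines ≠ snippet_ranges_alt lines

-- ===== LEMMAS AND PROOFS =====

-- the pair-marker events of an arbitrary enumerated list (abbreviation for the proofs only)
def pvMarkersOf (xs : List (Int × String)) : List (Int × Bool) :=
  (xs.filter
      (fun p => PySem.Str.startswith p.2 SN_PREFIX || PySem.Str.startswith p.2 SN_CLOSE)).map
    (fun p => (p.1, PySem.Str.startswith p.2 SN_PREFIX))

-- proof-side intermediate: A's state machine restricted to the marker events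
def alt_loop : List (Int × Bool) → Option Int → List (Int × Int) →
    Option (Option Int × List (Int × Int))
  | [], o, r => some (o, r)
  | (i, isStart) :: rest, o, r =>
    if isStart then
      alt_loop rest (some i) (match o with | some s => r ++ [(s, i)] | none => r)
    else
      match o with
      | none => none
      | some s => alt_loop rest none (r ++ [(s, i + 1)])

lemma alt_markers_eq (lines : List String) :
    alt_markers lines = pvMarkersOf (PySem.List.enumerate lines 0) := rfl

lemma pvMarkersOf_cons (i : Int) (line : String) (tl : List (Int × String)) :
    pvMarkersOf ((i, line) :: tl) =
      (if (PySem.Str.startswith line SN_PREFIX || PySem.Str.startswith line SN_CLOSE) = true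
        then [(i, PySem.Str.startswith line SN_PREFIX)] else []) ++ pvMarkersOf tl := by
  cases h : (PySem.Str.startswith line SN_PREFIX || PySem.Str.startswith line SN_CLOSE) <;>
    simp only [pvMarkersOf, List.filter_cons, h, Bool.false_eq_true, if_false, if_true,
      List.map_cons, List.nil_append, List.singleton_append]

-- A's per-line loop computes exactly the state machine over the collected marker events.
lemma loop_bridge : ∀ (xs : List (Int × String)) (o : Option Int) (r : List (Int × Int)),
    snippet_loop xs o r = alt_loop (pvMarkersOf xs) o r := by
  intro xs
  induction xs with
  | nil => intro o r; rfl
  | cons hd tl ih =>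
    intro o r
    obtain ⟨i, line⟩ := hd
    rw [pvMarkersOf_cons]
    cases hs : PySem.Str.startswith line SN_PREFIX with
    | true =>
      cases o <;>
        simp only [snippet_loop, process_line, hs, Bool.true_or, if_true,
          List.singleton_append, alt_loop, ih]
    | false =>
      cases he : PySem.Str.startswith line SN_CLOSE with
      | true =>
        cases o <;>
          simp only [snippet_loop, process_line, hs, he, Bool.false_or, Bool.false_eq_true,
            if_false, if_true, List.singleton_append, alt_loop, ih]
      | false =>
        simp only [snippet_loop, process_line, hs, he, Bool.or_self, Bool.false_eq_true,
          if_false, List.nil_append, ih]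

lemma flags_of_pairs : ∀ (xs : List (Int × String)),
    (pvMarkersOf xs).map (·.2) =
      ((xs.map (·.2)).filter
          (fun l => PySem.Str.startswith l SN_PREFIX || PySem.Str.startswith l SN_CLOSE)).map
        (fun l => PySem.Str.startswith l SN_PREFIX) := by
  intro xs
  induction xs with
  | nil => rfl
  | cons hd tl ih =>
    obtain ⟨i, line⟩ := hd
    rw [pvMarkersOf_cons]
    cases h : (PySem.Str.startswith line SN_PREFIX || PySem.Str.startswith line SN_CLOSE) <;>
      simp only [h, Bool.false_eq_true, if_false, if_true, List.map_cons, List.filter_cons,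
        List.nil_append, List.singleton_append, ih]

lemma flags_bridge (lines : List String) :
    (alt_markers lines).map (·.2) = markerFlags lines := by
  rw [alt_markers_eq, flags_of_pairs, PySem.List.map_snd_enumerate]
  rfl

-- end of the range opened before ms, determined by ms's first event
def endOf : List (Int × Bool) → Int
  | [] => -1
  | (j, true) :: _ => j
  | (j, false) :: _ => j + 1

-- closed-form pairing: each start paired with its successor event
def pairUp : List (Int × Bool) → List (Int × Int)
  | [] => []
  | (i, true) :: tl => (i, endOf tl) :: pairUp tl
  | (_, false) :: tl => pairUp tl

-- well-formed event lists given the open-state o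
inductive Valid : Option Int → List (Int × Bool) → Prop
  | nil (o) : Valid o []
  | start (o i tl) : Valid (some i) tl → Valid o ((i, true) :: tl)
  | stop (s i tl) : Valid none tl → Valid (some s) ((i, false) :: tl)

def finishUp : Option Int → List (Int × Int) → List (Int × Int)
  | some s, r => r ++ [(s, -1)]
  | none, r => r

def emit : Option Int → List (Int × Bool) → List (Int × Int)
  | none, ms => pairUp ms
  | some s, ms => (s, endOf ms) :: pairUp ms

lemma loop_pairs {o : Option Int} {ms : List (Int × Bool)} (h : Valid o ms) :
    ∀ r, ∃ o' r', alt_loop ms o r = some (o', r') ∧ finishUp o' r' = r ++ emit o ms := by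
  induction h with
  | nil o =>
    intro r
    refine ⟨o, r, rfl, ?_⟩
    cases o <;> simp [finishUp, emit, endOf, pairUp]
  | start o i tl _ ih =>
    intro r
    cases o with
    | none =>
      obtain ⟨o', r', heq, hfin⟩ := ih r
      exact ⟨o', r', by simpa [alt_loop] using heq, by simp [hfin, emit, pairUp, endOf]⟩
    | some s =>
      obtain ⟨o', r', heq, hfin⟩ := ih (r ++ [(s, i)])
      exact ⟨o', r', by simpa [alt_loop] using heq, by simp [hfin, emit, pairUp, endOf]⟩
  | stop s i tl _ ih =>
    intro r
    obtain ⟨o', r', heq, hfin⟩ := ih (r ++ [(s, i + 1)])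
    exact ⟨o', r', by simpa [alt_loop] using heq, by simp [hfin, emit, pairUp, endOf]⟩

-- B's pass-3 zip/filter/map expression is the closed-form pairing
lemma zip_pairs : ∀ (ms : List (Int × Bool)),
    ((ms.zip (ms.tail.map some ++ [none])).filter (fun p => p.1.2)).map
      (fun p => match p.2 with
        | none => (p.1.1, (-1 : Int))
        | some q => (p.1.1, if q.2 then q.1 else q.1 + 1)) = pairUp ms := by
  intro ms
  induction ms with
  | nil => rfl
  | cons hd tl ih =>
    obtain ⟨i, b⟩ := hd
    cases tl with
    | nil => cases b <;> simp [pairUp, endOf]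
    | cons q ts =>
      obtain ⟨j, c⟩ := q
      simp only [List.tail_cons] at ih
      cases b with
      | true => cases c <;> simp [List.zip_cons_cons, pairUp, endOf, ih]
      | false => simp [List.zip_cons_cons, pairUp, ih]

-- B's pass-2 predecessor check never fires on a well-formed event list
lemma chk_false {o : Option Int} {ms : List (Int × Bool)} (h : Valid o ms) :
    ∀ (prev : Option (Int × Bool)),
      (o.isSome → (match prev with | some q => q.2 | none => false) = true) →
      ((prev :: ms.map some).zip ms).any
        (fun pc => !pc.2.2 && (match pc.1 with | none => true | some q => !q.2)) = false := by
  induction h with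
  | nil o => intro prev _; rfl
  | start o i tl _ ih =>
    intro prev _
    simp only [List.map_cons, List.zip_cons_cons, List.any_cons, Bool.not_true,
      Bool.false_and, Bool.false_or]
    exact ih (some (i, true)) (fun _ => rfl)
  | stop s i tl _ ih =>
    intro prev hprev
    have hp := hprev (by rfl)
    cases prev with
    | none => simp at hp
    | some q =>
      have hq : q.2 = true := by simpa using hp
      have hrest := ih (some (i, false)) (by simp)
      simp [List.zip_cons_cons, hq, hrest]

lemma valid_of_flags : ∀ (ms : List (Int × Bool)) (o : Option Int),
    ((ms.map (·.2)).head? = some false → o.isSome) →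
    (∀ p ∈ (ms.map (·.2)).zip (ms.map (·.2)).tail, p.2 = false → p.1 = true) →
    Valid o ms := by
  intro ms
  induction ms with
  | nil => intro o _ _; exact Valid.nil o
  | cons hd tl ih =>
    intro o hh hc
    obtain ⟨i, b⟩ := hd
    have htl : ∀ p ∈ (tl.map (·.2)).zip (tl.map (·.2)).tail, p.2 = false → p.1 = true := by
      intro p hp
      apply hc
      rcases htll : tl.map (·.2) with _ | ⟨c, cs⟩
      · rw [htll] at hp; simp at hp
      · rw [htll] at hp
        simp only [List.map_cons, htll, List.tail_cons, List.zip_cons_cons, List.mem_cons]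
        right
        cases cs with
        | nil => simp at hp
        | cons d ds => exact hp
    cases b with
    | true => exact Valid.start o i tl (ih (some i) (fun _ => rfl) htl)
    | false =>
      have ho : o.isSome := hh (by simp)
      obtain ⟨s, rfl⟩ := Option.isSome_iff_exists.mp ho
      refine Valid.stop s i tl (ih none (fun hfalse => ?_) htl)
      rcases htll : tl.map (·.2) with _ | ⟨c, cs⟩
      · rw [htll] at hfalse; simp at hfalse
      · rw [htll] at hfalse
        simp only [List.head?_cons, Option.some.injEq] at hfalse
        have : (false, c) ∈ ((false :: c :: cs).zip (c :: cs)) := by simp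
        have h2 := hc (false, c) (by
          simp only [List.map_cons, htll, List.tail_cons]
          exact this) hfalse
        exact absurd h2 (by simp)

lemma alt_loop_ne_zero : ∀ (ms : List (Int × Bool)) (o : Option Int) (r : List (Int × Int))
    (o' : Option Int) (r' : List (Int × Int)),
    (∀ p ∈ ms, 0 < p.1) → o ≠ some 0 → alt_loop ms o r = some (o', r') → o' ≠ some 0 := by
  intro ms
  induction ms with
  | nil =>
    intro o r o' r' _ ho heq
    simp only [alt_loop, Option.some.injEq, Prod.mk.injEq] at heq
    rw [← heq.1]; exact ho
  | cons hd tl ih =>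
    intro o r o' r' hpos ho heq
    obtain ⟨i, b⟩ := hd
    have hi : 0 < i := hpos (i, b) (by simp)
    cases b with
    | true =>
      simp only [alt_loop, if_true] at heq
      exact ih (some i) _ o' r' (fun p hp => hpos p (by simp [hp]))
        (by simp only [ne_eq, Option.some.injEq]; omega) heq
    | false =>
      simp only [alt_loop, Bool.false_eq_true, if_false] at heq
      cases o with
      | none => simp at heq
      | some s => exact ih none _ o' r' (fun p hp => hpos p (by simp [hp])) (by simp) heq

lemma markers_fst_ge (xs : List String) (s : Int) :
    ∀ p ∈ pvMarkersOf (PySem.List.enumerate xs s), s ≤ p.1 := by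
  intro p hp
  simp only [pvMarkersOf, List.mem_map, List.mem_filter] at hp
  obtain ⟨q, ⟨hq, _⟩, rfl⟩ := hp
  obtain ⟨k, _, rfl⟩ := (PySem.List.mem_enumerate_iff _ _ _).mp hq
  simp

lemma markers_pairwise (lines : List String) :
    (alt_markers lines).Pairwise (fun p q => p.1 < q.1) := by
  rw [alt_markers_eq]
  exact ((PySem.List.pairwise_lt_enumerate lines 0).filter _).map _ (fun _ _ h => h)

lemma D_markers (lines : List String) (hD : D_snippet_ranges lines) :
    alt_markers lines = [((0 : Int), true)] := by
  obtain ⟨hne, hstart, hrest⟩ := hD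
  cases lines with
  | nil => exact absurd rfl hne
  | cons l rest =>
    simp only [List.headD_cons] at hstart
    simp only [List.tail_cons] at hrest
    rw [alt_markers_eq, PySem.List.enumerate_cons]
    have hm : (PySem.Str.startswith l SN_PREFIX || PySem.Str.startswith l SN_CLOSE) = true := by
      rw [hstart, Bool.true_or]
    rw [pvMarkersOf_cons, if_pos hm, hstart]
    have : pvMarkersOf (PySem.List.enumerate rest 1) = [] := by
      rw [pvMarkersOf, List.map_eq_nil_iff, List.filter_eq_nil_iff]
      intro p hp
      obtain ⟨k, hk, rfl⟩ := (PySem.List.mem_enumerate_iff _ _ _).mp hp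
      have hx := hrest rest[k] (by simp)
      rw [hx.1, hx.2]
      simp
    norm_num [this]

lemma markers_empty_nonmarker (xs : List String) (s : Int)
    (h : pvMarkersOf (PySem.List.enumerate xs s) = []) :
    ∀ x ∈ xs, PySem.Str.startswith x SN_PREFIX = false ∧
      PySem.Str.startswith x SN_CLOSE = false := by
  intro x hx
  rw [pvMarkersOf, List.map_eq_nil_iff, List.filter_eq_nil_iff] at h
  obtain ⟨k, hk, rfl⟩ := List.getElem_of_mem hx
  have hmem : ((s + (k : Int), xs[k]) : Int × String) ∈ PySem.List.enumerate xs s :=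
    (PySem.List.mem_enumerate_iff _ _ _).mpr ⟨k, hk, rfl⟩
  have := h _ hmem
  simpa using this

lemma alt_markers_cons (l : String) (rest : List String) :
    alt_markers (l :: rest) =
      (if (PySem.Str.startswith l SN_PREFIX || PySem.Str.startswith l SN_CLOSE) = true
        then [((0 : Int), PySem.Str.startswith l SN_PREFIX)] else []) ++
      pvMarkersOf (PySem.List.enumerate rest 1) := by
  rw [alt_markers_eq, PySem.List.enumerate_cons]
  by_cases h : (PySem.Str.startswith l SN_PREFIX || PySem.Str.startswith l SN_CLOSE) = true
  · rw [if_pos h]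
    simp only [pvMarkersOf, List.filter_cons, h, if_true, List.map_cons,
      List.singleton_append]
    norm_num
  · rw [if_neg h, List.nil_append]
    simp only [pvMarkersOf, List.filter_cons, h, Bool.false_eq_true, if_false]
    norm_num

lemma markers_singleton_zero (lines : List String)
    (h : alt_markers lines = [((0 : Int), true)]) : D_snippet_ranges lines := by
  cases lines with
  | nil => simp [alt_markers_eq, pvMarkersOf, PySem.List.enumerate_nil] at h
  | cons l rest =>
    rw [alt_markers_cons] at h
    by_cases hm : (PySem.Str.startswith l SN_PREFIX || PySem.Str.startswith l SN_CLOSE) = true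
    · rw [if_pos hm] at h
      simp only [List.singleton_append, List.cons_eq_cons] at h
      obtain ⟨h1, h2⟩ := h
      have hstart : PySem.Str.startswith l SN_PREFIX = true := by
        have := congrArg Prod.snd h1; simpa using this
      exact ⟨by simp, by simpa using hstart,
        by simpa using markers_empty_nonmarker rest 1 h2⟩
    · rw [if_neg hm, List.nil_append] at h
      have := markers_fst_ge rest 1 ((0 : Int), true) (by rw [h]; simp)
      simp at this

lemma final_zero_implies (lines : List String) (o' : Option Int) (r' : List (Int × Int))
    (heq : alt_loop (alt_markers lines) none [] = some (o', r')) (hz : o' = some 0) :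
    D_snippet_ranges lines := by
  rcases hms : alt_markers lines with _ | ⟨⟨i, b⟩, rest⟩
  · rw [hms] at heq
    simp only [alt_loop, Option.some.injEq, Prod.mk.injEq] at heq
    rw [← heq.1] at hz; exact absurd hz (by simp)
  · have hge := markers_fst_ge lines 0
    rw [show PySem.List.enumerate lines 0 = PySem.List.enumerate lines from rfl,
      ← alt_markers_eq, hms] at hge
    have hpw := markers_pairwise lines
    rw [hms] at heq hpw
    have hi0 : 0 ≤ i := hge (i, b) (by simp)
    have hrestpos : ∀ p ∈ rest, 0 < p.1 := by
      intro p hp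
      have := (List.pairwise_cons.mp hpw).1 p hp
      omega
    cases b with
    | false =>
      simp only [alt_loop, Bool.false_eq_true, if_false] at heq
      exact absurd heq (by simp)
    | true =>
      simp only [alt_loop, if_true] at heq
      by_cases hi : i = 0
      · subst hi
        cases rest with
        | nil =>
          simp only [alt_loop, Option.some.injEq, Prod.mk.injEq] at heq
          exact markers_singleton_zero lines hms
        | cons q rest2 =>
          obtain ⟨j, c⟩ := q
          have hj : 0 < j := hrestpos (j, c) (by simp)
          have hrest2 : ∀ p ∈ rest2, 0 < p.1 := fun p hp => hrestpos p (by simp [hp])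
          cases c with
          | true =>
            simp only [alt_loop, if_true] at heq
            exact absurd hz (alt_loop_ne_zero rest2 (some j) _ o' r' hrest2
              (by simp only [ne_eq, Option.some.injEq]; omega) heq)
          | false =>
            simp only [alt_loop, Bool.false_eq_true, if_false] at heq
            exact absurd hz (alt_loop_ne_zero rest2 none _ o' r' hrest2 (by simp) heq)
      · exact absurd hz
          (alt_loop_ne_zero rest (some i) _ o' r' hrestpos
            (by simp only [ne_eq, Option.some.injEq]; omega) heq)

lemma valid_of_pre (lines : List String) (hpre : Pre_snippet_ranges lines) :
    Valid none (alt_markers lines) := by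
  obtain ⟨hh, hc⟩ := hpre
  rw [← flags_bridge] at hh hc
  exact valid_of_flags (alt_markers lines) none (fun hfalse => absurd hfalse hh) hc

lemma alt_eval (lines : List String) (hv : Valid none (alt_markers lines)) :
    snippet_ranges_alt lines = pairUp (alt_markers lines) := by
  show (if _ = true then _ else _) = _
  rw [chk_false hv none (by simp)]
  simp only [Bool.false_eq_true, if_false]
  rw [zip_pairs]

-- ===== VERDICT (by name: the statement is the Claim_ definition above) =====
theorem snippet_ranges_spec : Claim_unchanged_snippet_ranges := by
  intro lines _ hpre hD
  have hv := valid_of_pre lines hpre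
  rw [alt_eval lines hv]
  unfold snippet_ranges
  rw [loop_bridge, show pvMarkersOf (PySem.List.enumerate lines) = alt_markers lines from rfl]
  obtain ⟨o', r', heq, hfin⟩ := loop_pairs hv []
  rw [heq]
  cases o' with
  | none => simpa [finishUp, emit] using hfin
  | some s =>
    have hs : s ≠ 0 := fun h0 => hD (final_zero_implies lines (some s) r' heq (by rw [h0]))
    simp only [hs, ne_eq, not_false_eq_true, if_true]
    simpa [finishUp, emit] using hfin

theorem snippet_ranges_changed : Claim_changed_snippet_ranges := by
  unfold Claim_changed_snippet_ranges; decide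

theorem snippet_ranges_tight : Claim_exact_snippet_ranges := by
  intro lines _ hpre hD
  have hms := D_markers lines hD
  rw [alt_eval lines (valid_of_pre lines hpre), hms]
  unfold snippet_ranges
  rw [loop_bridge, show pvMarkersOf (PySem.List.enumerate lines) = alt_markers lines from rfl,
    hms]
  simp [alt_loop, pairUp, endOf]
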